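-- pv_equiv track=rewrite | github.com/Caesar723/Ink-wash-photo-frame | webManager/module/simpleWhetherReport.py | classify_weather
-- ===== SOURCE A (Python) =====
-- def classify_weather(main: str, description: str) -> str:
--     """
--     只输出四种：sunny, rain, cloudy, snow, clear
--     """
--     m = (main or "").lower()
--     d = (description or "").lower()
--
--     if m == "clear":
--         return "clear"
--     if m == "snow":
--         return "snow"
--     if m in ("rain", "drizzle", "thunderstorm"):
--         return "rain"
--     if m == "clouds":
--         return "cloudy"
--
--     # fallback based on description keywords
--     if "snow" in d:
--         return "snow"
--     if any(k in d for k in ("rain", "shower", "storm", "drizzle", "thunder")):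
--         return "rain"
--     if "clear" in d:
--         return "sunny"
--     if any(k in d for k in ("cloud", "mist", "fog", "haze", "smoke", "dust")):
--         return "cloudy"
--
--     # 默认归类为 cloudy（比 sunny 更保守）
--     return "cloudy"
-- ===== SOURCE B (Python) =====
-- # Unified rule table; last-match-wins fold over the REVERSED table (no early return).
-- RULES = [
--     ("clear",  True,  ("clear",)),
--     ("snow",   True,  ("snow",)),
--     ("rain",   True,  ("rain", "drizzle", "thunderstorm")),
--     ("cloudy", True,  ("clouds",)),
--     ("snow",   False, ("snow",)),
--     ("rain",   False, ("rain", "shower", "storm", "drizzle", "thunder")),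
--     ("sunny",  False, ("clear",)),
--     ("cloudy", False, ("cloud", "mist", "fog", "haze", "smoke", "dust")),
-- ]
--
-- def classify_weather(main: str, description: str) -> str:
--     m = (main or "").lower()
--     d = (description or "").lower()
--     result = "cloudy"
--     for cat, exact, tokens in reversed(RULES):
--         if any((m == t) if exact else (t in d) for t in tokens):
--             result = cat
--     return result
-- ===== Notes on version B (the rewrite author's own statement) =====
-- stated objective: alternative
-- what changed: Replaced the early-return if/elif cascade with a last-match-wins fold: main-field and description rules are merged into one uniform rule table, which is traversed in reverse with an accumulator that each matching rule overwrites, so every rule is always evaluated and no branch returns early.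
import Mathlib
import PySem

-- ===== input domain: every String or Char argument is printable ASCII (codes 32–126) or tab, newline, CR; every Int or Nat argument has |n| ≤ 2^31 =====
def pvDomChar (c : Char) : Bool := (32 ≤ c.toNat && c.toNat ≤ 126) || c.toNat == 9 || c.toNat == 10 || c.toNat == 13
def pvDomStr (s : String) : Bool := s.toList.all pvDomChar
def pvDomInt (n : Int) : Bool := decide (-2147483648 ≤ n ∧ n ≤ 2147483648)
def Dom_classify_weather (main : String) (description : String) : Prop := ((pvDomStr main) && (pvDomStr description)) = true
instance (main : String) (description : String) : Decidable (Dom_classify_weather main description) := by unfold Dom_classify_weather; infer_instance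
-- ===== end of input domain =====

-- B merges the main-field and description rules into one table and computes the result by a last-match-wins fold over its reverse (no early return); alternative decomposition, same return value.


-- ===== PORT A =====
def classify_weather (main : String) (description : String) : String :=
  let m := PySem.Str.lower main
  let d := PySem.Str.lower description
  if m == "clear" then "clear"
  else if m == "snow" then "snow"
  else if m == "rain" || m == "drizzle" || m == "thunderstorm" then "rain"
  else if m == "clouds" then "cloudy"
  else if PySem.Str.isIn "snow" d then "snow"
  else if ["rain", "shower", "storm", "drizzle", "thunder"].any (fun k => PySem.Str.isIn k d) then "rain"
  else if PySem.Str.isIn "clear" d then "sunny"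
  else if ["cloud", "mist", "fog", "haze", "smoke", "dust"].any (fun k => PySem.Str.isIn k d) then "cloudy"
  else "cloudy"

-- ===== PORT B =====
-- B: one uniform rule table (category, exact-match?, tokens); last-match-wins fold over its reverse.
def pvRules : List (String × Bool × List String) :=
  [("clear",  true,  ["clear"]),
   ("snow",   true,  ["snow"]),
   ("rain",   true,  ["rain", "drizzle", "thunderstorm"]),
   ("cloudy", true,  ["clouds"]),
   ("snow",   false, ["snow"]),
   ("rain",   false, ["rain", "shower", "storm", "drizzle", "thunder"]),
   ("sunny",  false, ["clear"]),
   ("cloudy", false, ["cloud", "mist", "fog", "haze", "smoke", "dust"])]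

def classify_weather_alt (main : String) (description : String) : String :=
  let m := PySem.Str.lower main
  let d := PySem.Str.lower description
  pvRules.reverse.foldl
    (fun result r =>
      if r.2.2.any (fun t => if r.2.1 then m == t else PySem.Str.isIn t d) then r.1 else result)
    "cloudy"

-- ===== PRECONDITION & SPEC =====
def Spec_classify_weather (main : String) (description : String) (out : String) : Prop := out = classify_weather_alt main description
instance (main : String) (description : String) (out : String) : Decidable (Spec_classify_weather main description out) := by unfold Spec_classify_weather; infer_instance

-- ===== CLAIM (what is proved, stated in full; the proofs are below) =====
def Claim_equal_classify_weather : Prop := ∀ (main : String) (description : String), Dom_classify_weather main description → Spec_classify_weather main description (classify_weather main description)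

-- ===== LEMMAS AND PROOFS =====

-- ===== VERDICT (by name: the statement is the Claim_ definition above) =====
theorem classify_weather_spec : Claim_equal_classify_weather := by
  intro main description _
  unfold Spec_classify_weather classify_weather classify_weather_alt pvRules
  simp only [List.reverse_cons, List.reverse_nil, List.nil_append, List.cons_append,
    List.foldl_cons, List.foldl_nil, List.any_cons, List.any_nil, Bool.or_false,
    Bool.or_assoc, if_true, Bool.false_eq_true, if_false]
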